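-- pv_equiv track=rewrite | github.com/sadashiv0001/python-projects | in-memory-database/in-memory-db.py | in_memory_database
-- ===== SOURCE A (Python) =====
-- def in_memory_database(queries):
--     database = {}
--
--     def set_or_inc(key, field, value):
--         if key not in database:
--             database[key] = {}
--
--         if field not in database[key]:
--             database[key][field] = 0
--
--         database[key][field] += int(value)
--         return str(database[key][field])
--
--     def get(key, field):
--         if key in database and field in database[key]:
--             return str(database[key][field])
--         else:
--             return ""
--
--     def delete(key, field):
--         if key in database and field in database[key]:
--             del database[key][field]
--             if not database[key]:
--                 del database[key]
--             return "true"
--         else: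
--             return "false"
--
--     output = []
--
--     for query in queries:
--         operation = query[0]
--
--         if operation == "SET_OR_INC":
--             key, field, value = query[1], query[2], query[3]
--             result = set_or_inc(key, field, value)
--             output.append(result)
--
--         elif operation == "GET":
--             key, field = query[1], query[2]
--             result = get(key, field)
--             output.append(result)
--
--         elif operation == "DELETE":
--             key, field = query[1], query[2]
--             result = delete(key, field)
--             output.append(result)
--
--     return output
-- ===== SOURCE B (Python) =====
-- def in_memory_database(queries):
--     # Stateless replay: no database object at all.  Each query's answer is
--     # recomputed by scanning the history of earlier queries that touch the
--     # same (key, field): the current value exists iff a SET_OR_INC occurred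
--     # after the last matching DELETE, and equals the sum of those increments.
--     def current(history, key, field):
--         cur = None
--         for p in history:
--             op = p[0]
--             if op == "SET_OR_INC" and p[1] == key and p[2] == field:
--                 cur = (0 if cur is None else cur) + int(p[3])
--             elif op == "DELETE" and p[1] == key and p[2] == field:
--                 cur = None
--         return cur
--
--     output = []
--     history = []
--     for q in queries:
--         op = q[0]
--         if op == "SET_OR_INC":
--             cur = current(history, q[1], q[2])
--             output.append(str((0 if cur is None else cur) + int(q[3])))
--         elif op == "GET":
--             cur = current(history, q[1], q[2])
--             output.append("" if cur is None else str(cur))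
--         elif op == "DELETE":
--             output.append("true" if current(history, q[1], q[2]) is not None else "false")
--         history.append(q)
--     return output
-- ===== Notes on version B (the rewrite author's own statement) =====
-- stated objective: alternative
-- what changed: Replaces the mutable nested dict-of-dicts with a stateless replay: each query's answer is recomputed by scanning the accumulated history of earlier queries touching the same (key, field), so no database object or deletion/cleanup logic exists at all.
import Mathlib
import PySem

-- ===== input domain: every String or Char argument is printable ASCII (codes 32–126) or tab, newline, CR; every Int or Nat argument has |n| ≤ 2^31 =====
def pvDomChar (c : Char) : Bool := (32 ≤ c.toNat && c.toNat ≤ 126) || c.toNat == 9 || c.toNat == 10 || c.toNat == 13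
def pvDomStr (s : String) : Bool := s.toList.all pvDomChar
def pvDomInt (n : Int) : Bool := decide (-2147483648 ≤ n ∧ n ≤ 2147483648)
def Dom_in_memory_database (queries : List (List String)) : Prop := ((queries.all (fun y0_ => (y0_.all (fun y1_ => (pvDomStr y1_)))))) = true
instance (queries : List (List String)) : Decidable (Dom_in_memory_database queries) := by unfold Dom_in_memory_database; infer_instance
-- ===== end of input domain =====

-- B drops the mutable nested database entirely: each answer is recomputed by replaying the
-- history of earlier queries touching the same (key, field); same outputs, no dict state.

-- ===== PORT A =====
-- A's loop over queries with a nested dict 'database' and the growing 'output' list.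
def pvLoopA : List (List String) → PySem.Dict String (PySem.Dict String Int) → List String → List String
  | [], _, out => out
  | q :: rest, db, out =>
    let op := q.getD 0 ""
    if op = "SET_OR_INC" then
      let key := q.getD 1 ""
      let field := q.getD 2 ""
      let value := q.getD 3 ""
      -- if key not in database: database[key] = {}
      let db1 := if db.contains key then db else db.insert key PySem.Dict.empty
      let inner := db1.getD key PySem.Dict.empty
      -- if field not in database[key]: database[key][field] = 0
      let inner1 := if inner.contains field then inner else inner.insert field 0
      -- database[key][field] += int(value)   (int(value) exact via ofStr?; Pre_ excludes ValueError)
      let v := inner1.getD field 0 + (PySem.Int.ofStr? value).getD 0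
      pvLoopA rest (db1.insert key (inner1.insert field v)) (out ++ [PySem.Int.toStr v])
    else if op = "GET" then
      let key := q.getD 1 ""
      let field := q.getD 2 ""
      let r := if db.contains key && (db.getD key PySem.Dict.empty).contains field then
                 PySem.Int.toStr ((db.getD key PySem.Dict.empty).getD field 0)
               else ""
      pvLoopA rest db (out ++ [r])
    else if op = "DELETE" then
      let key := q.getD 1 ""
      let field := q.getD 2 ""
      if db.contains key && (db.getD key PySem.Dict.empty).contains field then
        let inner1 := (db.getD key PySem.Dict.empty).erase field
        -- if not database[key]: del database[key]
        let db1 := if inner1.size = 0 then db.erase key else db.insert key inner1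
        pvLoopA rest db1 (out ++ ["true"])
      else
        pvLoopA rest db (out ++ ["false"])
    else
      pvLoopA rest db out

def in_memory_database (queries : List (List String)) : List String :=
  pvLoopA queries PySem.Dict.empty []

-- ===== PORT B =====
-- body of B's 'current' replay loop over one history entry (op = p[0] inlined)
def pvStep (key field : String) (cur : Option Int) (p : List String) : Option Int :=
  if p.getD 0 "" = "SET_OR_INC" ∧ p.getD 1 "" = key ∧ p.getD 2 "" = field then
    some (cur.getD 0 + (PySem.Int.ofStr? (p.getD 3 "")).getD 0)
  else if p.getD 0 "" = "DELETE" ∧ p.getD 1 "" = key ∧ p.getD 2 "" = field then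
    none
  else cur

-- B's 'current(history, key, field)'
def pvCurrent (history : List (List String)) (key field : String) : Option Int :=
  history.foldl (pvStep key field) none

-- B's loop: carries the growing 'history' list, no database.
def pvLoopB : List (List String) → List (List String) → List String → List String
  | [], _, out => out
  | q :: rest, history, out =>
    let op := q.getD 0 ""
    if op = "SET_OR_INC" then
      let cur := pvCurrent history (q.getD 1 "") (q.getD 2 "")
      pvLoopB rest (history ++ [q])
        (out ++ [PySem.Int.toStr (cur.getD 0 + (PySem.Int.ofStr? (q.getD 3 "")).getD 0)])
    else if op = "GET" then
      pvLoopB rest (history ++ [q])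
        (out ++ [match pvCurrent history (q.getD 1 "") (q.getD 2 "") with
                 | none => ""
                 | some v => PySem.Int.toStr v])
    else if op = "DELETE" then
      pvLoopB rest (history ++ [q])
        (out ++ [if (pvCurrent history (q.getD 1 "") (q.getD 2 "")).isSome then "true" else "false"])
    else
      pvLoopB rest (history ++ [q]) out

def in_memory_database_alt (queries : List (List String)) : List String :=
  pvLoopB queries [] []

-- ===== PRECONDITION & SPEC =====
-- Pre_ excludes exactly the queries on which Python A raises: a query needs its operation
-- word (IndexError on []), SET_OR_INC needs 4 entries with an int-parsable value
-- (IndexError/ValueError), GET and DELETE need 3 entries (IndexError).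
def Pre_in_memory_database (queries : List (List String)) : Prop :=
  ∀ q ∈ queries, q ≠ [] ∧
    (q.getD 0 "" = "SET_OR_INC" → 4 ≤ q.length ∧ (PySem.Int.ofStr? (q.getD 3 "")).isSome) ∧
    (q.getD 0 "" = "GET" ∨ q.getD 0 "" = "DELETE" → 3 ≤ q.length)
instance (queries : List (List String)) : Decidable (Pre_in_memory_database queries) := by
  unfold Pre_in_memory_database; infer_instance

def pvWitness_in_memory_database : List (List String) :=
  [["SET_OR_INC", "a", "x", "5"], ["GET", "a", "x"], ["DELETE", "a", "x"], ["GET", "a", "x"]]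

def Spec_in_memory_database (queries : List (List String)) (out : List String) : Prop := out = in_memory_database_alt queries
instance (queries : List (List String)) (out : List String) : Decidable (Spec_in_memory_database queries out) := by unfold Spec_in_memory_database; infer_instance

-- ===== CLAIM (what is proved, stated in full; the proofs are below) =====
def Claim_equal_in_memory_database : Prop := ∀ (queries : List (List String)), Dom_in_memory_database queries → Pre_in_memory_database queries → Spec_in_memory_database queries (in_memory_database queries)

-- ===== LEMMAS AND PROOFS =====

-- combined lookup through A's nested dict
def pvLook (db : PySem.Dict String (PySem.Dict String Int)) (k f : String) : Option Int :=
  (db.get? k).bind (fun i => i.get? f)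

theorem pv_get?_erase {κ ν : Type} [BEq κ] [LawfulBEq κ] [DecidableEq κ]
    (d : PySem.Dict κ ν) (k k' : κ) :
    (d.erase k).get? k' = if k' = k then none else d.get? k' := by
  rcases d with ⟨items⟩
  induction items with
  | nil =>
    simp only [PySem.Dict.erase, PySem.Dict.get?, List.filter_nil, List.find?_nil,
      Option.map_none]
    split <;> rfl
  | cons p rest ih =>
    simp only [PySem.Dict.erase, PySem.Dict.get?, List.filter_cons] at *
    by_cases hk : p.1 = k
    · rw [if_neg (by simp [hk])]
      rw [ih]
      by_cases hk' : k' = k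
      · rw [if_pos hk', if_pos hk']
      · rw [if_neg hk', if_neg hk',
            List.find?_cons_of_neg (by simp [hk]; exact fun hkk => hk' hkk.symm)]
    · rw [if_pos (by simp [hk])]
      by_cases hp : p.1 = k'
      · rw [List.find?_cons_of_pos (by simp [hp]), List.find?_cons_of_pos (by simp [hp])]
        rw [if_neg (fun h => hk (by rw [hp, h]))]
      · rw [List.find?_cons_of_neg (by simp [hp]), List.find?_cons_of_neg (by simp [hp])]
        exact ih

theorem pv_erase_empty_get? {κ ν : Type} [BEq κ] [LawfulBEq κ] [DecidableEq κ]
    (d : PySem.Dict κ ν) (k f : κ) (h : (d.erase k).size = 0) (hne : f ≠ k) :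
    d.get? f = none := by
  have h1 := pv_get?_erase d k f
  rw [if_neg hne] at h1
  rw [← h1]
  rcases hi : (d.erase k).items with _ | ⟨p, rest⟩
  · simp [PySem.Dict.get?, hi]
  · exfalso; rw [PySem.Dict.size, hi] at h; simp at h

-- the inner dict A reads for key after the ensure-present step
theorem pv_inner_get (db : PySem.Dict String (PySem.Dict String Int)) (key f : String) :
    ((if db.contains key then db else db.insert key PySem.Dict.empty).getD key
        PySem.Dict.empty).get? f = pvLook db key f := by
  by_cases h : db.contains key
  · rw [if_pos h]
    rw [PySem.Dict.contains_eq_isSome_get?] at h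
    rcases hg : db.get? key with _ | i
    · simp [hg] at h
    · rw [PySem.Dict.getD_of_get?_eq_some db _ hg]
      simp [pvLook, hg]
  · rw [if_neg h, PySem.Dict.getD_insert_self]
    rw [PySem.Dict.contains_eq_isSome_get?] at h
    rcases hg : db.get? key with _ | i
    · simp [pvLook, hg, PySem.Dict.get?_empty]
    · simp [hg] at h

theorem pv_look_some (db : PySem.Dict String (PySem.Dict String Int)) (key field : String) :
    (db.contains key && (db.getD key PySem.Dict.empty).contains field)
      = (pvLook db key field).isSome := by
  rcases hg : db.get? key with _ | i
  · rw [PySem.Dict.contains_eq_isSome_get?, hg]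
    simp [pvLook, hg]
  · rw [PySem.Dict.getD_of_get?_eq_some db _ hg,
        PySem.Dict.contains_eq_isSome_get?, hg,
        PySem.Dict.contains_eq_isSome_get?]
    simp [pvLook, hg]

theorem pvStep_set (k f : String) (c : Option Int) (q : List String)
    (h1 : q.getD 0 "" = "SET_OR_INC") (h2 : q.getD 1 "" = k) (h3 : q.getD 2 "" = f) :
    pvStep k f c q = some (c.getD 0 + (PySem.Int.ofStr? (q.getD 3 "")).getD 0) := by
  unfold pvStep; rw [if_pos ⟨h1, h2, h3⟩]

theorem pvStep_del (k f : String) (c : Option Int) (q : List String)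
    (h1 : q.getD 0 "" = "DELETE") (h2 : q.getD 1 "" = k) (h3 : q.getD 2 "" = f) :
    pvStep k f c q = none := by
  unfold pvStep
  rw [if_neg (fun hx => absurd (h1.symm.trans hx.1) (by decide)), if_pos ⟨h1, h2, h3⟩]

theorem pvStep_miss (k f : String) (c : Option Int) (q : List String)
    (h1 : ¬(q.getD 0 "" = "SET_OR_INC" ∧ q.getD 1 "" = k ∧ q.getD 2 "" = f))
    (h2 : ¬(q.getD 0 "" = "DELETE" ∧ q.getD 1 "" = k ∧ q.getD 2 "" = f)) :
    pvStep k f c q = c := by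
  unfold pvStep; rw [if_neg h1, if_neg h2]

theorem pvCurrent_append (history : List (List String)) (q : List String) (k f : String) :
    pvCurrent (history ++ [q]) k f = pvStep k f (pvCurrent history k f) q := by
  simp [pvCurrent, List.foldl_append]

-- loop invariant: A's nested lookup agrees with B's history replay
theorem pv_loop_eq (qs : List (List String))
    (db : PySem.Dict String (PySem.Dict String Int))
    (history : List (List String)) (out : List String)
    (h : ∀ k f, pvLook db k f = pvCurrent history k f) :
    pvLoopA qs db out = pvLoopB qs history out := by
  induction qs generalizing db history out with
  | nil => rfl
  | cons q rest ih =>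
    simp only [pvLoopA, pvLoopB]
    by_cases hset : q.getD 0 "" = "SET_OR_INC"
    · rw [if_pos hset, if_pos hset]
      set key := q.getD 1 "" with hkey
      set field := q.getD 2 "" with hfield
      set db1 := if db.contains key then db else db.insert key PySem.Dict.empty with hdb1
      have hinner : ∀ f, (db1.getD key PySem.Dict.empty).get? f = pvLook db key f := by
        intro f; rw [hdb1]; exact pv_inner_get db key f
      set inner := db1.getD key PySem.Dict.empty with hi
      set inner1 := if inner.contains field then inner else inner.insert field 0 with hinner1
      have hval : inner1.getD field 0 = (pvCurrent history key field).getD 0 := by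
        rw [hinner1, ← h key field]
        by_cases hc : inner.contains field
        · rw [if_pos hc, PySem.Dict.getD_eq_get?_getD, hinner field]
        · rw [if_neg hc, PySem.Dict.getD_insert_self]
          have hn : inner.get? field = none := by
            rw [PySem.Dict.contains_eq_isSome_get?] at hc
            rcases hg : inner.get? field with _ | v
            · rfl
            · simp [hg] at hc
          rw [← hinner field, hn]; rfl
      rw [hval]
      apply ih
      intro k f
      rw [pvCurrent_append]
      by_cases hk : k = key
      · subst hk
        by_cases hf : f = field
        · subst hf
          simp only [pvLook, PySem.Dict.get?_insert_self, Option.bind_some,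
            PySem.Dict.get?_insert_self]
          rw [pvStep_set _ _ _ _ hset rfl rfl]
        · have h1 : ∀ w : Int, (inner1.insert field w).get? f = inner.get? f := by
            intro w
            rw [PySem.Dict.get?_insert_of_ne _ _ hf, hinner1]
            by_cases hc : inner.contains field
            · rw [if_pos hc]
            · rw [if_neg hc, PySem.Dict.get?_insert_of_ne _ _ hf]
          simp only [pvLook, PySem.Dict.get?_insert_self, Option.bind_some]
          rw [h1, hinner f, ← h key f,
              pvStep_miss _ _ _ _ (fun hx => hf (hfield.trans hx.2.2).symm)
                (fun hx => hf (hfield.trans hx.2.2).symm)]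
      · simp only [pvLook]
        rw [PySem.Dict.get?_insert_of_ne _ _ hk]
        have hdb1k : db1.get? k = db.get? k := by
          rw [hdb1]
          by_cases hc : db.contains key
          · rw [if_pos hc]
          · rw [if_neg hc, PySem.Dict.get?_insert_of_ne _ _ hk]
        rw [hdb1k, ← h k f,
            pvStep_miss _ _ _ _ (fun hx => hk (hkey.trans hx.2.1).symm)
              (fun hx => hk (hkey.trans hx.2.1).symm)]
        rfl
    · rw [if_neg hset, if_neg hset]
      by_cases hget : q.getD 0 "" = "GET"
      · rw [if_pos hget, if_pos hget]
        set key := q.getD 1 "" with hkey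
        set field := q.getD 2 "" with hfield
        have hinv : ∀ k f, pvLook db k f = pvCurrent (history ++ [q]) k f := by
          intro k f
          rw [pvCurrent_append,
              pvStep_miss _ _ _ _ (fun hx => hset hx.1)
                (fun hx => absurd (hget.symm.trans hx.1) (by decide))]
          exact h k f
        have hc := pv_look_some db key field
        rw [h key field] at hc
        rw [hc]
        rcases hg : pvCurrent history key field with _ | v
        · simp only [Option.isSome_none, Bool.false_eq_true, if_false]
          exact ih db (history ++ [q]) _ hinv
        · simp only [Option.isSome_some, if_true]
          have hvv : (db.getD key PySem.Dict.empty).getD field 0 = v := by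
            have hl : pvLook db key field = some v := by rw [h key field, hg]
            simp only [pvLook] at hl
            rcases hdg : db.get? key with _ | i
            · simp [hdg] at hl
            · rw [PySem.Dict.getD_of_get?_eq_some db _ hdg, PySem.Dict.getD_eq_get?_getD]
              simp only [hdg, Option.bind_some] at hl
              rw [hl]; rfl
          rw [hvv]
          exact ih db (history ++ [q]) _ hinv
      · rw [if_neg hget, if_neg hget]
        by_cases hdel : q.getD 0 "" = "DELETE"
        · rw [if_pos hdel, if_pos hdel]
          set key := q.getD 1 "" with hkey
          set field := q.getD 2 "" with hfield
          have hstep : ∀ k f c, pvStep k f c q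
              = if k = key ∧ f = field then none else c := by
            intro k f c
            by_cases hkf : k = key ∧ f = field
            · rw [if_pos hkf,
                  pvStep_del _ _ _ _ hdel (hkey.symm.trans hkf.1.symm)
                    (hfield.symm.trans hkf.2.symm)]
            · rw [if_neg hkf,
                  pvStep_miss _ _ _ _ (fun hx => hset hx.1)
                    (fun hx => hkf ⟨(hkey.trans hx.2.1).symm, (hfield.trans hx.2.2).symm⟩)]
          have hc := pv_look_some db key field
          rw [h key field] at hc
          rw [hc]
          rcases hg : pvCurrent history key field with _ | v
          · simp only [Option.isSome_none, Bool.false_eq_true, if_false]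
            apply ih
            intro k f
            rw [pvCurrent_append, hstep]
            by_cases hkf : k = key ∧ f = field
            · rw [if_pos hkf, h k f, hkf.1, hkf.2, hg]
            · rw [if_neg hkf]; exact h k f
          · simp only [Option.isSome_some, if_true]
            have hdbk : ∃ i, db.get? key = some i ∧ db.getD key PySem.Dict.empty = i := by
              rcases hdg : db.get? key with _ | i
              · exfalso
                have hN : pvLook db key field = none := by simp [pvLook, hdg]
                rw [h key field, hg] at hN; simp at hN
              · exact ⟨i, rfl, PySem.Dict.getD_of_get?_eq_some db _ hdg⟩
            rcases hdbk with ⟨i, hdg, hgd⟩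
            rw [hgd]
            apply ih
            intro k f
            rw [pvCurrent_append, hstep]
            by_cases hkf : k = key ∧ f = field
            · rw [if_pos hkf, hkf.1, hkf.2]
              by_cases hsz : (i.erase field).size = 0
              · rw [if_pos hsz]
                simp only [pvLook]
                rw [pv_get?_erase db key key, if_pos rfl]; rfl
              · rw [if_neg hsz]
                simp only [pvLook, PySem.Dict.get?_insert_self, Option.bind_some]
                rw [pv_get?_erase i field field, if_pos rfl]
            · rw [if_neg hkf, ← h k f]
              by_cases hsz : (i.erase field).size = 0
              · rw [if_pos hsz]
                by_cases hk : k = key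
                · subst hk
                  have hf : f ≠ field := fun hf => hkf ⟨rfl, hf⟩
                  simp only [pvLook]
                  rw [pv_get?_erase db key key, if_pos rfl]
                  have hfn : i.get? f = none := pv_erase_empty_get? i field f hsz hf
                  simp [hdg, hfn]
                · simp only [pvLook]
                  rw [pv_get?_erase db key k, if_neg hk]
              · rw [if_neg hsz]
                by_cases hk : k = key
                · subst hk
                  have hf : f ≠ field := fun hf => hkf ⟨rfl, hf⟩
                  simp only [pvLook, PySem.Dict.get?_insert_self, Option.bind_some]
                  rw [pv_get?_erase i field f, if_neg hf, hdg]
                  rfl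
                · simp only [pvLook]
                  rw [PySem.Dict.get?_insert_of_ne _ _ hk]
        · rw [if_neg hdel, if_neg hdel]
          apply ih
          intro k f
          rw [pvCurrent_append,
              pvStep_miss _ _ _ _ (fun hx => hset hx.1) (fun hx => hdel hx.1)]
          exact h k f

-- ===== VERDICT (by name: the statement is the Claim_ definition above) =====
theorem in_memory_database_spec : Claim_equal_in_memory_database := by
  intro queries _ _
  show in_memory_database queries = in_memory_database_alt queries
  apply pv_loop_eq
  intro k f
  simp [pvLook, pvCurrent, PySem.Dict.get?_empty]
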